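-- pv_equiv track=rewrite | github.com/alexboc10/FaceRek | lambda_handlers/vision.py | genderStats
-- ===== SOURCE A (Python) =====
-- def genderStats(result):
--     male = 0
--     female = 0
--
--     for person in result['Items']:
--         if person["genderValue"] == 'Male':
--             male = male + 1
--         elif person["genderValue"] == 'Female':
--             female = female + 1
--
--     return "I know about {} men and {} women!".format(male, female)
-- ===== SOURCE B (Python) =====
-- def genderStats(result):
--     genders = [person["genderValue"] for person in result['Items']]
--     return "I know about {} men and {} women!".format(genders.count('Male'), genders.count('Female'))
-- ===== Notes on version B (the rewrite author's own statement) =====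
-- stated objective: idiomatic
-- what changed: Replaces the two branch-driven counters maintained in a loop with a single extraction of all gender values followed by two list.count queries.
import Mathlib
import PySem

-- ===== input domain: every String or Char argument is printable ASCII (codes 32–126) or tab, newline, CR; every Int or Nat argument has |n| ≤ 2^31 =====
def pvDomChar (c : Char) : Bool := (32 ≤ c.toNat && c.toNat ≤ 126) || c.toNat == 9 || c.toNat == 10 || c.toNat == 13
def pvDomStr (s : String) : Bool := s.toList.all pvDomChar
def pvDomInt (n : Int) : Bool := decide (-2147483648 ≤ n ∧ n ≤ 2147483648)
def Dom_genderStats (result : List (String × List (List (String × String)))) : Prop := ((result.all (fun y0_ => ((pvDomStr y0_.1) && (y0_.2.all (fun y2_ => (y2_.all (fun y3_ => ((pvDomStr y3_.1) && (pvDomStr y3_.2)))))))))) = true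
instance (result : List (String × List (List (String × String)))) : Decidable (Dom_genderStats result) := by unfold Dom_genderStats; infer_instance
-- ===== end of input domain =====

-- B replaces A's two branch-driven counters with one extraction of all gender values
-- followed by two list.count queries (idiomatic; same cost).

-- ===== PORT A =====
def genderStats (result : List (String × List (List (String × String)))) : String :=
  let items := (PySem.Dict.mk result).getD "Items" []   -- result['Items']; exact under Pre_ (key present)
  let mf := items.foldl (fun (mf : Int × Int) person =>
      let g := (PySem.Dict.mk person).getD "genderValue" ""   -- exact under Pre_ (key present)
      if g = "Male" then (mf.1 + 1, mf.2)
      else if g = "Female" then (mf.1, mf.2 + 1)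
      else mf) (0, 0)
  "I know about " ++ PySem.Int.toStr mf.1 ++ " men and " ++ PySem.Int.toStr mf.2 ++ " women!"

-- ===== PORT B =====
def genderStats_alt (result : List (String × List (List (String × String)))) : String :=
  let genders := ((PySem.Dict.mk result).getD "Items" []).map
      (fun person => (PySem.Dict.mk person).getD "genderValue" "")
  "I know about " ++ PySem.Int.toStr (genders.count "Male" : Int)
    ++ " men and " ++ PySem.Int.toStr (genders.count "Female" : Int) ++ " women!"

-- ===== PRECONDITION & SPEC =====
-- Pre_ excludes exactly the inputs where Python A raises KeyError: a missing 'Items'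
-- key, or a person dict without 'genderValue' (B raises there too).
def Pre_genderStats (result : List (String × List (List (String × String)))) : Prop :=
  ((PySem.Dict.mk result).contains "Items"
    && ((PySem.Dict.mk result).getD "Items" []).all
        (fun person => (PySem.Dict.mk person).contains "genderValue")) = true
instance (result : List (String × List (List (String × String)))) : Decidable (Pre_genderStats result) := by
  unfold Pre_genderStats; infer_instance
def pvWitness_genderStats : (List (String × List (List (String × String)))) :=
  [("Items", [[("genderValue", "Male")], [("genderValue", "Female")]])]

def Spec_genderStats (result : List (String × List (List (String × String)))) (out : String) : Prop := out = genderStats_alt result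
instance (result : List (String × List (List (String × String)))) (out : String) : Decidable (Spec_genderStats result out) := by unfold Spec_genderStats; infer_instance

-- ===== CLAIM (what is proved, stated in full; the proofs are below) =====
def Claim_equal_genderStats : Prop := ∀ (result : List (String × List (List (String × String)))), Dom_genderStats result → Pre_genderStats result → Spec_genderStats result (genderStats result)

-- ===== LEMMAS AND PROOFS =====
lemma fold_counts (g : List (String × String) → String)
    (l : List (List (String × String))) (m f : Int) :
    l.foldl (fun (mf : Int × Int) person =>
      if g person = "Male" then (mf.1 + 1, mf.2)
      else if g person = "Female" then (mf.1, mf.2 + 1)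
      else mf) (m, f)
    = (m + ((l.map g).count "Male" : Int),
       f + ((l.map g).count "Female" : Int)) := by
  induction l generalizing m f with
  | nil => simp
  | cons p t ih =>
    simp only [List.foldl_cons, List.map_cons]
    by_cases h1 : g p = "Male"
    · simp [h1, ih]; ring_nf
    · by_cases h2 : g p = "Female"
      · simp [h2, ih]; ring_nf
      · simp [h1, h2, ih]

-- ===== VERDICT (by name: the statement is the Claim_ definition above) =====
theorem genderStats_spec : Claim_equal_genderStats := by
  intro result _ _
  unfold Spec_genderStats genderStats genderStats_alt
  simp only [fold_counts (fun person => (PySem.Dict.mk person).getD "genderValue" ""), zero_add]
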